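-- pv_equiv track=rewrite | github.com/james5635/GeekForGeek-Data-Structure-and-Algorithm | array/surpasser_count/solution.py | find_surpasser_count_brute_force
-- ===== SOURCE A (Python) =====
-- from typing import List
--
-- def find_surpasser_count_brute_force(arr: List[int]) -> List[int]:
--     """
--     Brute force approach for comparison.
--     Time: O(n^2), Space: O(1)
--     """
--     n = len(arr)
--     result = []
--
--     for i in range(n):
--         count = 0
--         for j in range(i + 1, n):
--             if arr[j] > arr[i]:
--                 count += 1
--         result.append(count)
--
--     return result
-- ===== SOURCE B (Python) =====
-- from typing import List
--
-- def find_surpasser_count_brute_force(arr: List[int]) -> List[int]: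
--     """
--     Right-to-left sweep maintaining the already-seen suffix as a sorted list:
--     each element's surpasser count is the number of kept elements strictly
--     greater than it, read off at its insertion point.
--     """
--     sorted_suffix = []
--     rev_counts = []
--     for x in reversed(arr):
--         pos = 0
--         while pos < len(sorted_suffix) and sorted_suffix[pos] <= x:
--             pos += 1
--         rev_counts.append(len(sorted_suffix) - pos)
--         sorted_suffix.insert(pos, x)
--     rev_counts.reverse()
--     return rev_counts
-- ===== Notes on version B (the rewrite author's own statement) =====
-- stated objective: alternative
-- what changed: Replaces the nested index scans with a single right-to-left sweep that keeps the already-seen suffix as a sorted list and reads each surpasser count off the insertion position.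
import Mathlib
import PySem

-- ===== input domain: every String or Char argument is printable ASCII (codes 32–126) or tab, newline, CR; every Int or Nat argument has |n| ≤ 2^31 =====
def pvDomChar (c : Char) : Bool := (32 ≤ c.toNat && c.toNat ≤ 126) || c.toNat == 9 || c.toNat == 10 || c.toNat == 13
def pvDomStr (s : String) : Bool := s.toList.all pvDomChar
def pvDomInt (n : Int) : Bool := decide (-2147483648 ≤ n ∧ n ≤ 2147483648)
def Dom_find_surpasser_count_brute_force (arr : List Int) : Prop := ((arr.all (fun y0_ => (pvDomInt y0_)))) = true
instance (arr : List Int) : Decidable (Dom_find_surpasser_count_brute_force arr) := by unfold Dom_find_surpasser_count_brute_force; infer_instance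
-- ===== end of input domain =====

-- B replaces the nested index scans with a right-to-left sweep keeping the seen suffix sorted; same results, alternative algorithm (no speed claim).

-- ===== PORT A =====
def find_surpasser_count_brute_force (arr : List Int) : List Int :=
  let n : Int := arr.length
  (PySem.List.pyRange 0 n 1).foldl
    (fun result i =>
      let count : Int :=
        (PySem.List.pyRange (i + 1) n 1).foldl
          (fun c j => if PySem.List.pyGetD arr i 0 < PySem.List.pyGetD arr j 0 then c + 1 else c)
          0
      result ++ [count])
    []

-- ===== PORT B =====
-- the inner while-loop of Source B: skip elements ≤ x, count the rest, insert x there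
def pvInsCnt (x : Int) : List Int → List Int × Nat
  | [] => ([x], 0)
  | y :: ys =>
    if y ≤ x then
      let r := pvInsCnt x ys
      (y :: r.1, r.2)
    else
      (x :: y :: ys, (y :: ys).length)

def find_surpasser_count_brute_force_alt (arr : List Int) : List Int :=
  let st := arr.reverse.foldl
    (fun (st : List Int × List Int) x =>
      let r := pvInsCnt x st.1
      (r.1, st.2 ++ [(r.2 : Int)]))
    ([], [])
  st.2.reverse

-- ===== PRECONDITION & SPEC =====
def Spec_find_surpasser_count_brute_force (arr : List Int) (out : List Int) : Prop := out = find_surpasser_count_brute_force_alt arr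
instance (arr : List Int) (out : List Int) : Decidable (Spec_find_surpasser_count_brute_force arr out) := by unfold Spec_find_surpasser_count_brute_force; infer_instance

-- ===== CLAIM (what is proved, stated in full; the proofs are below) =====
def Claim_equal_find_surpasser_count_brute_force : Prop := ∀ (arr : List Int), Dom_find_surpasser_count_brute_force arr → Spec_find_surpasser_count_brute_force arr (find_surpasser_count_brute_force arr)

-- ===== LEMMAS AND PROOFS =====

-- canonical middle form: head count over the tail, recurse
def pvBrute : List Int → List Int
  | [] => []
  | x :: xs => ((xs.countP (fun y => x < y) : Nat) : Int) :: pvBrute xs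

-- generalized form carrying the elements already passed (to the RIGHT of the slice)
def pvBruteW : List Int → List Int → List Int
  | [], _ => []
  | x :: xs, seen => (((xs ++ seen).countP (fun y => x < y) : Nat) : Int) :: pvBruteW xs seen

-- naive right-to-left counting against the raw (unsorted) seen list
def pvNaive : List Int → List Int → List Int
  | [], _ => []
  | x :: l, seen => ((seen.countP (fun y => x < y) : Nat) : Int) :: pvNaive l (x :: seen)

theorem pvInsCnt_fst_perm (x : Int) (l : List Int) : ((pvInsCnt x l).1).Perm (x :: l) := by
  induction l with
  | nil => simp [pvInsCnt]
  | cons y ys ih =>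
    simp only [pvInsCnt]
    split
    · exact (ih.cons y).trans (List.Perm.swap x y ys)
    · exact List.Perm.refl _

theorem pvInsCnt_fst_sorted (x : Int) (l : List Int) (h : l.Pairwise (· ≤ ·)) :
    ((pvInsCnt x l).1).Pairwise (· ≤ ·) := by
  induction l with
  | nil => simp [pvInsCnt]
  | cons y ys ih =>
    rcases List.pairwise_cons.mp h with ⟨hy, hys⟩
    simp only [pvInsCnt]
    split
    · rename_i hyx
      refine List.pairwise_cons.mpr ⟨?_, ih hys⟩
      intro z hz
      rcases List.mem_cons.mp ((pvInsCnt_fst_perm x ys).mem_iff.mp hz) with rfl | hzys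
      · exact hyx
      · exact hy z hzys
    · rename_i hyx
      rw [not_le] at hyx
      refine List.pairwise_cons.mpr ⟨?_, h⟩
      intro z hz
      rcases List.mem_cons.mp hz with rfl | hzys
      · exact le_of_lt hyx
      · exact le_of_lt (lt_of_lt_of_le hyx (hy z hzys))

theorem pvInsCnt_snd (x : Int) (l : List Int) (h : l.Pairwise (· ≤ ·)) :
    (pvInsCnt x l).2 = l.countP (fun y => x < y) := by
  induction l with
  | nil => simp [pvInsCnt]
  | cons y ys ih =>
    rcases List.pairwise_cons.mp h with ⟨hy, hys⟩
    simp only [pvInsCnt]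
    split
    · rename_i hyx
      rw [ih hys, List.countP_cons]
      simp [not_lt.mpr hyx]
    · rename_i hyx
      rw [not_le] at hyx
      rw [List.countP_eq_length.mpr]
      intro z hz
      rcases List.mem_cons.mp hz with rfl | hzys
      · simpa using hyx
      · simpa using lt_of_lt_of_le hyx (hy z hzys)

theorem pv_fold_eq_naive : ∀ (l suf seen out : List Int), suf.Pairwise (· ≤ ·) → suf.Perm seen →
    (l.foldl (fun (st : List Int × List Int) x =>
        let r := pvInsCnt x st.1
        (r.1, st.2 ++ [(r.2 : Int)])) (suf, out)).2 = out ++ pvNaive l seen := by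
  intro l
  induction l with
  | nil => intro suf seen out _ _; simp [pvNaive]
  | cons x l ih =>
    intro suf seen out hs hp
    simp only [List.foldl_cons]
    rw [ih ((pvInsCnt x suf).1) (x :: seen) _ (pvInsCnt_fst_sorted x suf hs)
        ((pvInsCnt_fst_perm x suf).trans (hp.cons x))]
    rw [pvInsCnt_snd x suf hs, hp.countP_eq]
    simp [pvNaive]

theorem pvBruteW_append (y : Int) : ∀ (xs seen : List Int),
    pvBruteW (xs ++ [y]) seen = pvBruteW xs (y :: seen) ++ [((seen.countP (fun z => y < z) : Nat) : Int)] := by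
  intro xs
  induction xs with
  | nil => intro seen; simp [pvBruteW]
  | cons x xs ih =>
    intro seen
    simp only [List.cons_append, pvBruteW, ih]
    rw [List.append_assoc xs [y] seen]
    rfl

theorem pvNaive_reverse : ∀ (l seen : List Int), (pvNaive l.reverse seen).reverse = pvBruteW l seen := by
  intro l
  induction l using List.reverseRecOn with
  | nil => intro seen; simp [pvNaive, pvBruteW]
  | append_singleton ys y ih =>
    intro seen
    rw [List.reverse_append]
    simp only [List.reverse_cons, List.reverse_nil, List.nil_append, List.singleton_append, pvNaive]
    rw [pvBruteW_append, ih (y :: seen)]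

theorem pvBruteW_nil : ∀ (l : List Int), pvBruteW l [] = pvBrute l := by
  intro l
  induction l with
  | nil => rfl
  | cons x xs ih => simp [pvBruteW, pvBrute, ih]

theorem pvAlt_eq_brute (arr : List Int) : find_surpasser_count_brute_force_alt arr = pvBrute arr := by
  simp only [find_surpasser_count_brute_force_alt]
  rw [pv_fold_eq_naive arr.reverse [] [] [] (by simp) (List.Perm.refl _)]
  simp only [List.nil_append]
  rw [pvNaive_reverse arr [], pvBruteW_nil]

def pvF (arr : List Int) (i : Int) : Int :=
  (PySem.List.pyRange (i + 1) (arr.length : Int) 1).foldl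
    (fun c j => if PySem.List.pyGetD arr i 0 < PySem.List.pyGetD arr j 0 then c + 1 else c) 0

theorem pvF_closed (arr : List Int) (i : Int) (hi : 0 ≤ i + 1) :
    pvF arr i =
      (((arr.drop (i + 1).toNat).countP (fun y => decide (PySem.List.pyGetD arr i 0 < y)) : Nat) : Int) := by
  unfold pvF
  rw [PySem.List.foldl_pyRange_pyGetD' arr 0
      (fun c v => if PySem.List.pyGetD arr i 0 < v then c + 1 else c) 0 hi]
  rw [PySem.List.foldl_ite_add_one]
  simp

theorem pvMap_eq_brute : ∀ (arr : List Int),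
    (PySem.List.pyRange 0 (arr.length : Int) 1).map (pvF arr) = pvBrute arr := by
  intro arr
  induction arr with
  | nil => simp [PySem.List.pyRange_one_eq_nil le_rfl, pvBrute]
  | cons x xs ih =>
    have h0 : (0 : Int) < ((x :: xs).length : Int) := by exact_mod_cast Nat.succ_pos xs.length
    rw [PySem.List.pyRange_one_cons h0, List.map_cons]
    have hhead : pvF (x :: xs) 0 = ((xs.countP (fun y => decide (x < y)) : Nat) : Int) := by
      rw [pvF_closed (x :: xs) 0 (by omega)]
      simp [PySem.List.pyGetD_zero_cons]
    have htail : (PySem.List.pyRange (0 + 1) ((x :: xs).length : Int) 1).map (pvF (x :: xs)) =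
        (PySem.List.pyRange 0 (xs.length : Int) 1).map (pvF xs) := by
      rw [PySem.List.pyRange_one (0 + 1), PySem.List.pyRange_one 0]
      have hn1 : (((x :: xs).length : Int) - (0 + 1)).toNat = xs.length := by
        simp only [List.length_cons, Nat.cast_add, Nat.cast_one]; omega
      have hn2 : ((xs.length : Int) - 0).toNat = xs.length := by omega
      rw [hn1, hn2, List.map_map, List.map_map]
      refine List.map_congr_left ?_
      intro k hk
      have hk' : k < xs.length := List.mem_range.mp hk
      simp only [Function.comp_apply]
      rw [pvF_closed (x :: xs) (0 + 1 + (k : Int)) (by omega),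
          pvF_closed xs (0 + (k : Int)) (by omega)]
      have hc : (0 + 1 + (k : Int)) = ((k + 1 : Nat) : Int) := by push_cast; ring
      have hc0 : (0 + (k : Int)) = ((k : Nat) : Int) := by ring
      rw [hc, hc0, PySem.List.pyGetD_natCast, PySem.List.pyGetD_natCast]
      have hd1 : (((k + 1 : Nat) : Int) + 1).toNat = k + 2 := by omega
      have hd2 : (((k : Nat) : Int) + 1).toNat = k + 1 := by omega
      rw [hd1, hd2]
      simp only [List.getD_cons_succ, List.drop_succ_cons]
    rw [htail, ih, hhead]
    rfl

theorem pvA_eq_brute (arr : List Int) : find_surpasser_count_brute_force arr = pvBrute arr := by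
  have h := PySem.List.foldl_append_singleton_eq_map (pvF arr)
      (PySem.List.pyRange 0 (arr.length : Int) 1) []
  have h2 : find_surpasser_count_brute_force arr =
      [] ++ (PySem.List.pyRange 0 (arr.length : Int) 1).map (pvF arr) := h
  rw [h2, List.nil_append, pvMap_eq_brute]

-- ===== VERDICT (by name: the statement is the Claim_ definition above) =====
theorem find_surpasser_count_brute_force_spec : Claim_equal_find_surpasser_count_brute_force := by
  intro arr _
  unfold Spec_find_surpasser_count_brute_force
  rw [pvA_eq_brute, pvAlt_eq_brute]
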